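-- pv_equiv track=rewrite | github.com/AchRef864/Number_Guesser | NumGuess.py | interval1
-- ===== SOURCE A (Python) =====
-- def interval1(x):
--     a = "1"
--     b = "1"
--     c = len(str(x))
--     for i in range(c-1):
--         a += "0"
--     for i in range(c):
--         b += "0"
--     return f"[{a} .. {b}]"
-- ===== SOURCE B (Python) =====
-- def interval1(x):
--     c = len(str(x))
--     return f"[{10 ** (c - 1)} .. {10 ** c}]"
-- ===== Notes on version B (the rewrite author's own statement) =====
-- stated objective: simpler
-- what changed: Replaced the two zero-appending string-building loops with closed-form integer exponentiation of the base, formatting both endpoints directly.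
import Mathlib
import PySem

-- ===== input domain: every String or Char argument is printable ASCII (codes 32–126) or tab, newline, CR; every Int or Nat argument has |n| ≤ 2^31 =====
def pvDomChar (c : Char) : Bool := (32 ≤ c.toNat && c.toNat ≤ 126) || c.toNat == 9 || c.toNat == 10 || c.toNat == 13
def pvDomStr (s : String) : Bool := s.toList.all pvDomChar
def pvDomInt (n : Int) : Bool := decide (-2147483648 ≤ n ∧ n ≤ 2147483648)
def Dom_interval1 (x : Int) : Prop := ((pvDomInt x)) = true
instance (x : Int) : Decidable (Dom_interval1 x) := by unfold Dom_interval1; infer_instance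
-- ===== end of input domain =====

-- B replaces A's two zero-appending loops by closed-form powers of ten; objective: simpler.

-- ===== PORT A =====
def interval1 (x : Int) : String :=
  let a := "1"
  let b := "1"
  let c : Int := PySem.Str.len (PySem.Int.toStr x)
  let a := (PySem.List.pyRange 0 (c - 1) 1).foldl (fun s _ => s ++ "0") a
  let b := (PySem.List.pyRange 0 c 1).foldl (fun s _ => s ++ "0") b
  "[" ++ a ++ " .. " ++ b ++ "]"

-- ===== PORT B =====
-- exponent c-1: c ≥ 1 always (str of an int is nonempty), so '.toNat' on it is exact.
def interval1_alt (x : Int) : String :=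
  let c : Int := PySem.Str.len (PySem.Int.toStr x)
  "[" ++ PySem.Int.toStr ((10 : Int) ^ (c - 1).toNat) ++ " .. " ++
    PySem.Int.toStr ((10 : Int) ^ c.toNat) ++ "]"

-- ===== PRECONDITION & SPEC =====
def Spec_interval1 (x : Int) (out : String) : Prop := out = interval1_alt x
instance (x : Int) (out : String) : Decidable (Spec_interval1 x out) := by unfold Spec_interval1; infer_instance

-- ===== CLAIM (what is proved, stated in full; the proofs are below) =====
def Claim_equal_interval1 : Prop := ∀ (x : Int), Dom_interval1 x → Spec_interval1 x (interval1 x)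

-- ===== LEMMAS AND PROOFS =====

lemma pv_toDigits_pos (m : Nat) : 1 ≤ (Nat.toDigits 10 m).length := by
  show 1 ≤ (Nat.toDigitsCore 10 (m + 1) m []).length
  simp only [Nat.toDigitsCore]
  split_ifs
  · simp
  · rw [Nat.toDigitsCore_lens_eq]
    omega

lemma pv_len_toStr (x : Int) (h : -2147483648 ≤ x ∧ x ≤ 2147483648) :
    1 ≤ (PySem.Int.toStr x).toList.length ∧ (PySem.Int.toStr x).toList.length ≤ 11 := by
  have hl : (PySem.Int.toStr x).toList.length = (PySem.Int.toChars x).length := by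
    rw [PySem.Int.toList_toStr x]
  have hub : (Nat.toDigits 10 x.natAbs).length ≤ 10 :=
    Nat.toDigits_length 10 x.natAbs 10 (by norm_num) (by
      have : x.natAbs ≤ 2147483648 := by omega
      calc x.natAbs ≤ 2147483648 := this
        _ < 10 ^ 10 := by norm_num)
  have hlb := pv_toDigits_pos x.natAbs
  rw [hl]
  unfold PySem.Int.toChars
  split_ifs with hneg
  · simp only [List.length_cons]
    omega
  · have hx : x.toNat = x.natAbs := by omega
    rw [hx]
    omega

lemma pv_case (n : Nat) (h1 : 1 ≤ n) (h2 : n ≤ 11) (x : Int)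
    (hx : (PySem.Int.toStr x).toList.length = n) : interval1 x = interval1_alt x := by
  have hc : PySem.Str.len (PySem.Int.toStr x) = (n : Int) := by
    rw [PySem.Str.len_eq, hx]
  simp only [interval1, interval1_alt, hc]
  interval_cases n <;> decide

-- ===== VERDICT (by name: the statement is the Claim_ definition above) =====
theorem interval1_spec : Claim_equal_interval1 := by
  intro x hdom
  have hb : -2147483648 ≤ x ∧ x ≤ 2147483648 := by
    have := of_decide_eq_true hdom
    exact this
  obtain ⟨h1, h2⟩ := pv_len_toStr x hb
  exact pv_case _ h1 h2 x rfl
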